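-- pv_equiv track=rewrite | github.com/descon-uccs/resalloc-playing | resalloc-playing.py | createISet
-- ===== SOURCE A (Python) =====
-- def createISet(n) :
--     # this only works for the dual-flavored LP
--     I = set()
--     for a in range(n+1) :
--         for x in range(n+1) :
--             for b in range(n+1) :
--                 if a+x+b>0 and a+x+b<n+1 and (a*x*b == 0 or a+x+b==n):
--                     I.add((a,x,b))
--     return I
-- ===== SOURCE B (Python) =====
-- def createISet(n):
--     # Directly enumerate the zero-coordinate faces and the a+x+b==n plane:
--     # O(n^2) tuples produced, no cubic scan.
--     I = set()
--     for a in range(n + 1):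
--         for x in range(n + 1):
--             s = a + x
--             if a == 0 or x == 0:
--                 lo = 0 if s > 0 else 1
--                 for b in range(lo, n - s + 1):
--                     I.add((a, x, b))
--             else:
--                 if s <= n:
--                     I.add((a, x, 0))
--                 if n - s > 0:
--                     I.add((a, x, n - s))
--     return I
-- ===== Notes on version B (the rewrite author's own statement) =====
-- stated objective: faster
-- what changed: Instead of scanning all (n+1)^3 triples and testing each, B enumerates for each (a,x) exactly the valid b-values directly (a whole b-range on the zero faces a==0 or x==0, and at most b=0 and b=n-a-x otherwise), producing only the O(n^2) kept tuples.
import Mathlib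
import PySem

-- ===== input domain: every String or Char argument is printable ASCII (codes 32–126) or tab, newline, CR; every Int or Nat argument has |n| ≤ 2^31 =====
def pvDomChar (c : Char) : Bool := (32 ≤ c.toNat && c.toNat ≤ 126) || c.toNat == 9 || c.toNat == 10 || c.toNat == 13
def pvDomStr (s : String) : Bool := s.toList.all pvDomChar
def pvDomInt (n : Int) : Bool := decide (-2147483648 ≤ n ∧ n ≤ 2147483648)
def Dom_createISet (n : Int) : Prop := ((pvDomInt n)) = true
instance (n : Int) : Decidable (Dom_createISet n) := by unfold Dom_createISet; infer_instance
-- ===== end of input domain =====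

-- B replaces A's cubic scan of all (a,x,b) triples by a direct O(n^2) enumeration of the
-- zero-coordinate faces and the a+x+b = n plane; same set, same insertion order.


-- ===== PORT A =====
def createISet (n : Int) : List (Int × Int × Int) :=
  (PySem.List.pyRange 0 (n+1) 1).foldl (fun I a =>
    (PySem.List.pyRange 0 (n+1) 1).foldl (fun I x =>
      (PySem.List.pyRange 0 (n+1) 1).foldl (fun I b =>
        if 0 < a+x+b ∧ a+x+b < n+1 ∧ (a*x*b = 0 ∨ a+x+b = n)
        then PySem.Set.add I (a,x,b) else I) I) I)
    PySem.Set.empty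

-- ===== PORT B =====
def createISet_alt (n : Int) : List (Int × Int × Int) :=
  (PySem.List.pyRange 0 (n+1) 1).foldl (fun I a =>
    (PySem.List.pyRange 0 (n+1) 1).foldl (fun I x =>
      let s := a + x
      if a = 0 ∨ x = 0 then
        (PySem.List.pyRange (if 0 < s then 0 else 1) (n - s + 1) 1).foldl
          (fun I b => PySem.Set.add I (a,x,b)) I
      else
        let I' := if s ≤ n then PySem.Set.add I (a,x,0) else I
        if 0 < n - s then PySem.Set.add I' (a,x,n-s) else I') I)
    PySem.Set.empty

-- ===== PRECONDITION & SPEC =====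
def Spec_createISet (n : Int) (out : List (Int × Int × Int)) : Prop := out = createISet_alt n
instance (n : Int) (out : List (Int × Int × Int)) : Decidable (Spec_createISet n out) := by unfold Spec_createISet; infer_instance

-- ===== CLAIM (what is proved, stated in full; the proofs are below) =====
def Claim_equal_createISet : Prop := ∀ (n : Int), Dom_createISet n → Spec_createISet n (createISet n)

-- ===== LEMMAS AND PROOFS =====

-- the b-values A's innermost loop keeps for a fixed (a, x)
def bsA (n a x : Int) : List Int :=
  (PySem.List.pyRange 0 (n+1) 1).filter
    (fun b => decide (0 < a+x+b ∧ a+x+b < n+1 ∧ (a*x*b = 0 ∨ a+x+b = n)))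

-- the b-values B produces for a fixed (a, x)
def bsB (n a x : Int) : List Int :=
  if a = 0 ∨ x = 0 then
    PySem.List.pyRange (if 0 < a+x then 0 else 1) (n - (a+x) + 1) 1
  else
    (if a+x ≤ n then [(0:Int)] else []) ++ (if 0 < n - (a+x) then [n-(a+x)] else [])

-- 'if p(b): I.add(f(b))' over a list is Set.add over the filtered, mapped list
theorem foldl_ite_add {α : Type} [BEq α] (p : Int → Prop) [DecidablePred p] (f : Int → α)
    (l : List Int) (I : List α) :
    l.foldl (fun I b => if p b then PySem.Set.add I (f b) else I) I
      = ((l.filter (fun b => decide (p b))).map f).foldl PySem.Set.add I := by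
  induction l generalizing I with
  | nil => rfl
  | cons hd tl ih =>
    by_cases h : p hd <;> simp [List.foldl_cons, h, ih]

-- filtering a range by an interval gives a range
theorem filter_range_interval (lo hi : Int) : ∀ (k : Nat) (l u : Int), (u - l).toNat = k →
    (PySem.List.pyRange l u 1).filter (fun b => decide (lo ≤ b ∧ b ≤ hi))
      = PySem.List.pyRange (max l lo) (min u (hi+1)) 1 := by
  intro k
  induction k with
  | zero =>
    intro l u hk
    rw [PySem.List.pyRange_one_eq_nil (by omega), PySem.List.pyRange_one_eq_nil (by omega)]
    rfl
  | succ k ih =>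
    intro l u hk
    rw [PySem.List.pyRange_one_cons (by omega), List.filter_cons]
    by_cases h : lo ≤ l ∧ l ≤ hi
    · rw [if_pos (by simpa using h), ih (l+1) u (by omega),
        show max (l+1) lo = l+1 by omega, show max l lo = l by omega,
        PySem.List.pyRange_one_cons (show l < min u (hi+1) by omega)]
    · rw [if_neg (by simpa using h), ih (l+1) u (by omega)]
      by_cases h2 : l < lo
      · rw [show max (l+1) lo = max l lo by omega]
      · -- then hi < l: both ranges empty
        rw [PySem.List.pyRange_one_eq_nil (by omega), PySem.List.pyRange_one_eq_nil (by omega)]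
theorem bs_eq (n a x : Int) (ha : 0 ≤ a) (hx : 0 ≤ x) : bsA n a x = bsB n a x := by
  unfold bsA bsB
  by_cases hax : a = 0 ∨ x = 0
  · rw [if_pos hax]
    have hcongr : ∀ (lo : Int), (0 < a + x ↔ lo = 0) → (¬ 0 < a + x ↔ lo = 1) →
        List.filter (fun b => decide (0 < a+x+b ∧ a+x+b < n+1 ∧ (a*x*b = 0 ∨ a+x+b = n)))
            (PySem.List.pyRange 0 (n+1) 1)
          = List.filter (fun b => decide (lo ≤ b ∧ b ≤ n - (a+x)))
            (PySem.List.pyRange 0 (n+1) 1) := by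
      intro lo h0 h1
      refine List.filter_congr (fun b hb => ?_)
      rw [PySem.List.mem_pyRange_one] at hb
      have hz : a*x*b = 0 := by rcases hax with h | h <;> simp [h]
      simp only [decide_eq_decide, hz, true_or, and_true]
      omega
    by_cases hs : 0 < a + x
    · rw [if_pos hs, hcongr 0 (by omega) (by omega),
        filter_range_interval 0 (n-(a+x)) (n+1-0).toNat 0 (n+1) rfl,
        show max (0:Int) 0 = 0 by omega,
        show min (n+1) (n-(a+x)+1) = n-(a+x)+1 by omega]
    · rw [if_neg hs, hcongr 1 (by omega) (by omega),
        filter_range_interval 1 (n-(a+x)) (n+1-0).toNat 0 (n+1) rfl,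
        show max (0:Int) 1 = 1 by omega,
        show min (n+1) (n-(a+x)+1) = n-(a+x)+1 by omega]
  · rw [if_neg hax]
    rcases not_or.mp hax with ⟨ha0, hx0⟩
    have ha1 : 1 ≤ a := by omega
    have hx1 : 1 ≤ x := by omega
    have hmul : ∀ b : Int, a*x*b = 0 ↔ b = 0 := by
      intro b
      simp only [mul_eq_zero]
      constructor
      · rintro ((h | h) | h) <;> omega
      · intro h; tauto
    by_cases c2 : 0 < n - (a+x)
    · -- both 0 and n-(a+x) are kept
      have hcL :
          List.filter (fun b => decide (0 < a+x+b ∧ a+x+b < n+1 ∧ (a*x*b = 0 ∨ a+x+b = n)))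
              (PySem.List.pyRange 0 (n-(a+x)) 1)
            = List.filter (fun b => decide ((0:Int) ≤ b ∧ b ≤ 0))
              (PySem.List.pyRange 0 (n-(a+x)) 1) := by
        refine List.filter_congr (fun b hb => ?_)
        rw [PySem.List.mem_pyRange_one] at hb
        simp only [decide_eq_decide, hmul b]
        omega
      have hcR :
          List.filter (fun b => decide (0 < a+x+b ∧ a+x+b < n+1 ∧ (a*x*b = 0 ∨ a+x+b = n)))
              (PySem.List.pyRange (n-(a+x)) (n+1) 1)
            = List.filter (fun b => decide (n-(a+x) ≤ b ∧ b ≤ n-(a+x)))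
              (PySem.List.pyRange (n-(a+x)) (n+1) 1) := by
        refine List.filter_congr (fun b hb => ?_)
        rw [PySem.List.mem_pyRange_one] at hb
        simp only [decide_eq_decide, hmul b]
        omega
      rw [if_pos (by omega), if_pos c2,
        PySem.List.pyRange_one_append 0 (n-(a+x)) (n+1) (by omega) (by omega),
        List.filter_append, hcL, hcR,
        filter_range_interval 0 0 (n-(a+x)-0).toNat 0 (n-(a+x)) rfl,
        filter_range_interval (n-(a+x)) (n-(a+x)) (n+1-(n-(a+x))).toNat (n-(a+x)) (n+1) rfl,
        show max (0:Int) 0 = 0 by omega, show min (n-(a+x)) (0+1 : Int) = 0+1 by omega,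
        show max (n-(a+x)) (n-(a+x)) = n-(a+x) by omega,
        show min (n+1) (n-(a+x)+1) = n-(a+x)+1 by omega,
        PySem.List.pyRange_one_singleton, PySem.List.pyRange_one_singleton]
    · by_cases c1 : a + x ≤ n
      · -- only b = 0 is kept (a+x = n)
        have hcF :
            List.filter (fun b => decide (0 < a+x+b ∧ a+x+b < n+1 ∧ (a*x*b = 0 ∨ a+x+b = n)))
                (PySem.List.pyRange 0 (n+1) 1)
              = List.filter (fun b => decide ((0:Int) ≤ b ∧ b ≤ 0))
                (PySem.List.pyRange 0 (n+1) 1) := by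
          refine List.filter_congr (fun b hb => ?_)
          rw [PySem.List.mem_pyRange_one] at hb
          simp only [decide_eq_decide, hmul b]
          omega
        rw [if_pos c1, if_neg c2, hcF,
          filter_range_interval 0 0 (n+1-0).toNat 0 (n+1) rfl,
          show max (0:Int) 0 = 0 by omega, show min (n+1) (0+1 : Int) = 0+1 by omega,
          PySem.List.pyRange_one_singleton, List.append_nil]
      · -- nothing is kept (a+x > n)
        rw [if_neg c1, if_neg c2, List.append_nil, List.filter_eq_nil_iff.mpr]
        intro b hb
        rw [PySem.List.mem_pyRange_one] at hb
        simp only [decide_eq_true_eq, not_and, hmul b]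
        omega
theorem A_flat (n : Int) :
    createISet n
      = ((PySem.List.pyRange 0 (n+1) 1).flatMap (fun a =>
          (PySem.List.pyRange 0 (n+1) 1).flatMap (fun x =>
            (bsA n a x).map (fun b => (a,x,b))))).foldl PySem.Set.add PySem.Set.empty := by
  unfold createISet bsA
  simp only [List.foldl_flatMap, foldl_ite_add, List.foldl_map]

theorem B_inner (n a x : Int) (I : List (Int × Int × Int)) :
    (if a = 0 ∨ x = 0 then
        (PySem.List.pyRange (if 0 < a + x then 0 else 1) (n - (a+x) + 1) 1).foldl
          (fun I b => PySem.Set.add I (a,x,b)) I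
      else
        (if 0 < n - (a+x)
         then PySem.Set.add (if a+x ≤ n then PySem.Set.add I (a,x,0) else I) (a,x,n-(a+x))
         else (if a+x ≤ n then PySem.Set.add I (a,x,0) else I)))
      = ((bsB n a x).map (fun b => (a,x,b))).foldl PySem.Set.add I := by
  unfold bsB
  by_cases hax : a = 0 ∨ x = 0
  · rw [if_pos hax, if_pos hax, List.foldl_map]
  · rw [if_neg hax, if_neg hax]
    by_cases c2 : 0 < n - (a+x)
    · have c1 : a + x ≤ n := by omega
      rw [if_pos c2, if_pos c1, if_pos c1, if_pos c2]
      rfl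
    · rw [if_neg c2, if_neg c2]
      by_cases c1 : a + x ≤ n
      · rw [if_pos c1, if_pos c1]
        rfl
      · rw [if_neg c1, if_neg c1]
        rfl
theorem B_flat (n : Int) :
    createISet_alt n
      = ((PySem.List.pyRange 0 (n+1) 1).flatMap (fun a =>
          (PySem.List.pyRange 0 (n+1) 1).flatMap (fun x =>
            (bsB n a x).map (fun b => (a,x,b))))).foldl PySem.Set.add PySem.Set.empty := by
  unfold createISet_alt
  simp only [List.foldl_flatMap, B_inner]

-- ===== VERDICT (by name: the statement is the Claim_ definition above) =====
theorem createISet_spec : Claim_equal_createISet := by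
  intro n _
  unfold Spec_createISet
  rw [A_flat, B_flat]
  congr 1
  refine List.flatMap_congr (fun a haMem => ?_)
  refine List.flatMap_congr (fun x hxMem => ?_)
  rw [PySem.List.mem_pyRange_one] at haMem hxMem
  rw [bs_eq n a x haMem.1 hxMem.1]
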